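-- pv_equiv track=rewrite | github.com/hgxuquan/quanxu.github.io | workTest/perfect_number.py | count
-- ===== SOURCE A (Python) =====
-- def count(x):
--     if x <= 0 or x > 500000:
--         return -1
--     cn = 0
--     for i in range(1, x):
--         num = 0
--         for k in range(1, i):
--             if i % k == 0:
--                 num += k
--         if i == num:
--             cn += 1
--     return cn
-- ===== SOURCE B (Python) =====
-- def count(x):
--     if x <= 0 or x > 500000:
--         return -1
--     s = [0] * x
--     for k in range(1, x):
--         for m in range(2 * k, x, k):
--             s[m] += k
--     cn = 0
--     for i in range(1, x):
--         if s[i] == i: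
--             cn += 1
--     return cn
-- ===== Notes on version B (the rewrite author's own statement) =====
-- stated objective: faster
-- what changed: Replaced the per-number trial-division divisor sum (inner scan over all k < i) by a single divisor-sum sieve that adds each k to all its proper multiples, then one pass comparing s[i] to i.
import Mathlib
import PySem

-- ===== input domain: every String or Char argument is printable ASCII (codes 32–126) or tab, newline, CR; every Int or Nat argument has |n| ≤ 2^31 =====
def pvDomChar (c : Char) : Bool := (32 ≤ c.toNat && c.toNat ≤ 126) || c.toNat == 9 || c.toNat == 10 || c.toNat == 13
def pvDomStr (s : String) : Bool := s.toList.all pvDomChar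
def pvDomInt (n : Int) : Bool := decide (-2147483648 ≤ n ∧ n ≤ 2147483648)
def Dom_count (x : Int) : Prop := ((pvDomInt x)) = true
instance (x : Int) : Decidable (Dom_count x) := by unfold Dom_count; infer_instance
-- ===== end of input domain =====

-- B replaces A's per-number trial-division divisor sum by a divisor-sum sieve
-- (add each k to all its proper multiples), an asymptotically faster algorithm.

-- ===== PORT A =====
def count (x : Int) : Int :=
  if x ≤ 0 ∨ 500000 < x then -1
  else
    (PySem.List.pyRange 1 x 1).foldl (fun cn i =>
      let num := (PySem.List.pyRange 1 i 1).foldl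
        (fun num k => if PySem.Int.mod i k = 0 then num + k else num) 0
      if i = num then cn + 1 else cn) 0

-- ===== PORT B =====
def count_alt (x : Int) : Int :=
  if x ≤ 0 ∨ 500000 < x then -1
  else
    let s := (PySem.List.pyRange 1 x 1).foldl (fun s k =>
        (PySem.List.pyRange (2*k) x k).foldl
          (fun s m => PySem.List.pySetD s m (PySem.List.pyGetD s m 0 + k)) s)
      (List.replicate x.toNat 0)
    (PySem.List.pyRange 1 x 1).foldl (fun cn i =>
      if PySem.List.pyGetD s i 0 = i then cn + 1 else cn) 0

-- ===== PRECONDITION & SPEC =====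
def Spec_count (x : Int) (out : Int) : Prop := out = count_alt x
instance (x : Int) (out : Int) : Decidable (Spec_count x out) := by unfold Spec_count; infer_instance

-- ===== CLAIM (what is proved, stated in full; the proofs are below) =====
def Claim_equal_count : Prop := ∀ (x : Int), Dom_count x → Spec_count x (count x)

-- ===== LEMMAS AND PROOFS =====

def pvSig (i : Int) : Int :=
  ((PySem.List.pyRange 1 i 1).map (fun k => if PySem.Int.mod i k = 0 then k else 0)).sum

theorem pvInnerA (i : Int) :
    (PySem.List.pyRange 1 i 1).foldl
      (fun num k => if PySem.Int.mod i k = 0 then num + k else num) 0 = pvSig i := by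
  rw [PySem.List.foldl_congr_mem _ _ (fun num k => num + (if PySem.Int.mod i k = 0 then k else 0)) _
      (by intro acc k _; by_cases h : PySem.Int.mod i k = 0 <;> simp [h])]
  rw [PySem.List.foldl_add]
  simp [pvSig]

theorem pvUpdGet (s : List Int) (m i k : Int)
    (hm0 : 0 ≤ m) (hm1 : m < (s.length : Int)) (hi0 : 0 ≤ i) (_hi1 : i < (s.length : Int)) :
    PySem.List.pyGetD (PySem.List.pySetD s m (PySem.List.pyGetD s m 0 + k)) i 0
      = if i = m then PySem.List.pyGetD s i 0 + k else PySem.List.pyGetD s i 0 := by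
  have hm : m = ((m.toNat : Nat) : Int) := (Int.toNat_of_nonneg hm0).symm
  have hi : i = ((i.toNat : Nat) : Int) := (Int.toNat_of_nonneg hi0).symm
  rw [hm, hi, PySem.List.pyGetD_pySetD_natCast s m.toNat i.toNat _ _ (by omega)]
  by_cases h : i = m
  · simp [h]
  · rw [if_neg (by omega), if_neg (by rw [← hm, ← hi]; exact h)]

theorem pvFoldLen (ms : List Int) (k : Int) (s : List Int) :
    (ms.foldl (fun s m => PySem.List.pySetD s m (PySem.List.pyGetD s m 0 + k)) s).length
      = s.length := by
  induction ms generalizing s with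
  | nil => rfl
  | cons m ms ih => simp [List.foldl_cons, ih, PySem.List.length_pySetD]

theorem pvFoldGet (ms : List Int) (k : Int) (s : List Int) (i : Int)
    (hnd : ms.Nodup) (hms : ∀ m ∈ ms, 0 ≤ m ∧ m < (s.length : Int))
    (hi0 : 0 ≤ i) (hi1 : i < (s.length : Int)) :
    PySem.List.pyGetD (ms.foldl (fun s m => PySem.List.pySetD s m (PySem.List.pyGetD s m 0 + k)) s) i 0
      = PySem.List.pyGetD s i 0 + (if i ∈ ms then k else 0) := by
  induction ms generalizing s with
  | nil => simp
  | cons m ms ih =>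
    obtain ⟨hm0, hm1⟩ := hms m (by simp)
    have hlen : (PySem.List.pySetD s m (PySem.List.pyGetD s m 0 + k)).length = s.length :=
      PySem.List.length_pySetD s m _
    rw [List.foldl_cons,
      ih _ hnd.of_cons (by intro m' hm'; rw [hlen]; exact hms m' (by simp [hm'])) (by rw [hlen]; exact hi1)]
    rw [pvUpdGet s m i k hm0 hm1 hi0 hi1]
    by_cases h : i = m
    · have hnot : i ∉ ms := by rw [h]; exact (List.nodup_cons.mp hnd).1
      subst h; simp [hnot]
    · by_cases h2 : i ∈ ms <;> simp [h, h2]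

theorem pvNodupRange (a b k : Int) (hk : 0 < k) : (PySem.List.pyRange a b k).Nodup := by
  rw [PySem.List.pyRange_of_pos a b hk]
  apply List.Nodup.map _ (List.nodup_range)
  intro p q h
  have : (p : Int) = q := by
    have h' : k * (p : Int) = k * q := by
      have := add_left_cancel h
      exact this
    exact mul_left_cancel₀ (by omega) h'
  exact_mod_cast this

theorem pvSieveGet (x : Int) (ks : List Int) (s : List Int) (i : Int)
    (hks : ∀ k ∈ ks, 1 ≤ k) (hlen : (s.length : Int) = x)
    (hi0 : 0 ≤ i) (hi1 : i < x) :
    PySem.List.pyGetD (ks.foldl (fun s k =>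
        (PySem.List.pyRange (2*k) x k).foldl
          (fun s m => PySem.List.pySetD s m (PySem.List.pyGetD s m 0 + k)) s) s) i 0
      = PySem.List.pyGetD s i 0
        + (ks.map (fun k => if k ∣ i ∧ 2*k ≤ i then k else 0)).sum := by
  induction ks generalizing s with
  | nil => simp
  | cons k ks ih =>
    have hk1 : 1 ≤ k := hks k (by simp)
    have hkpos : (0:Int) < k := by omega
    have hlen' := pvFoldLen (PySem.List.pyRange (2*k) x k) k s
    rw [List.foldl_cons, ih _ (fun k' hk' => hks k' (by simp [hk'])) (by rw [hlen']; exact hlen)]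
    rw [pvFoldGet _ k s i (pvNodupRange _ _ _ hkpos)
      (by intro m hm
          rw [PySem.List.mem_pyRange_iff_of_pos hkpos] at hm
          constructor <;> omega)
      hi0 (by omega)]
    have hmem : (i ∈ PySem.List.pyRange (2*k) x k) ↔ (k ∣ i ∧ 2*k ≤ i) := by
      rw [PySem.List.mem_pyRange_iff_of_pos hkpos]
      constructor
      · rintro ⟨h1, _, h3⟩
        refine ⟨?_, h1⟩
        have := dvd_add h3 (dvd_mul_left k 2)
        simpa using this
      · rintro ⟨h1, h2⟩
        exact ⟨h2, hi1, dvd_sub h1 (dvd_mul_left k 2)⟩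
    rw [List.map_cons, List.sum_cons]
    by_cases h : k ∣ i ∧ 2*k ≤ i
    · rw [if_pos (hmem.mpr h), if_pos h]; ring
    · rw [if_neg (fun hc => h (hmem.mp hc)), if_neg h]; ring

theorem pvSumSig (x i : Int) (hi : 1 ≤ i) (hix : i < x) :
    ((PySem.List.pyRange 1 x 1).map (fun k => if k ∣ i ∧ 2*k ≤ i then k else 0)).sum
      = pvSig i := by
  rw [PySem.List.pyRange_one_append 1 i x hi (by omega), List.map_append, List.sum_append]
  have h2 : ((PySem.List.pyRange i x 1).map (fun k => if k ∣ i ∧ 2*k ≤ i then k else 0)).sum = 0 := by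
    apply List.sum_eq_zero
    intro y hy
    simp only [List.mem_map] at hy
    obtain ⟨k, hk, rfl⟩ := hy
    rw [PySem.List.mem_pyRange_one] at hk
    rw [if_neg]
    rintro ⟨_, h2k⟩
    omega
  rw [h2, add_zero, pvSig]
  apply congrArg
  apply List.map_congr_left
  intro k hk
  rw [PySem.List.mem_pyRange_one] at hk
  have : (k ∣ i ∧ 2*k ≤ i) ↔ PySem.Int.mod i k = 0 := by
    rw [PySem.Int.mod_eq_zero_iff_dvd]
    constructor
    · exact fun h => h.1
    · intro hdvd
      refine ⟨hdvd, ?_⟩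
      obtain ⟨c, hc⟩ := hdvd
      have hc2 : 2 ≤ c := by
        by_contra hcl
        push Not at hcl
        have : k * c ≤ k * 1 := by
          apply mul_le_mul_of_nonneg_left (by omega) (by omega)
        omega
      have : k * 2 ≤ k * c := mul_le_mul_of_nonneg_left hc2 (by omega)
      omega
  by_cases h : k ∣ i ∧ 2*k ≤ i
  · rw [if_pos h, if_pos (this.mp h)]
  · rw [if_neg h, if_neg (fun hc => h (this.mpr hc))]

theorem pvFinal (x : Int) (hg : ¬ (x ≤ 0 ∨ 500000 < x)) :
    (PySem.List.pyRange 1 x 1).foldl (fun cn i =>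
      let num := (PySem.List.pyRange 1 i 1).foldl
        (fun num k => if PySem.Int.mod i k = 0 then num + k else num) 0
      if i = num then cn + 1 else cn) (0 : Int)
    = (PySem.List.pyRange 1 x 1).foldl (fun cn i =>
      if PySem.List.pyGetD ((PySem.List.pyRange 1 x 1).foldl (fun s k =>
        (PySem.List.pyRange (2*k) x k).foldl
          (fun s m => PySem.List.pySetD s m (PySem.List.pyGetD s m 0 + k)) s)
      (List.replicate x.toNat 0)) i 0 = i then cn + 1 else cn) (0 : Int) := by
  push Not at hg
  apply PySem.List.foldl_congr_mem
  intro cn i hi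
  rw [PySem.List.mem_pyRange_one] at hi
  have hsi : PySem.List.pyGetD ((PySem.List.pyRange 1 x 1).foldl (fun s k =>
        (PySem.List.pyRange (2*k) x k).foldl
          (fun s m => PySem.List.pySetD s m (PySem.List.pyGetD s m 0 + k)) s)
      (List.replicate x.toNat 0)) i 0 = pvSig i := by
    rw [pvSieveGet x _ _ i
      (by intro k hk; rw [PySem.List.mem_pyRange_one] at hk; omega)
      (by simp; omega) (by omega) (by omega)]
    rw [PySem.List.pyGetD_eq_getElem _ _ (by omega) (by simp; omega)]
    simp only [List.getElem_replicate, zero_add]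
    exact pvSumSig x i (by omega) (by omega)
  simp only [pvInnerA, hsi]
  by_cases h : i = pvSig i
  · rw [if_pos h, if_pos h.symm]
  · rw [if_neg h, if_neg (fun hc => h hc.symm)]

-- ===== VERDICT (by name: the statement is the Claim_ definition above) =====
theorem count_spec : Claim_equal_count := by
  intro x _
  unfold Spec_count count count_alt
  by_cases hg : x ≤ 0 ∨ 500000 < x
  · rw [if_pos hg, if_pos hg]
  · rw [if_neg hg, if_neg hg]
    exact pvFinal x hg
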